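-- pv_equiv track=rewrite | github.com/Albion114514/bert_Chinese | predict.py | _parse_human_labels
-- ===== SOURCE A (Python) =====
-- def _parse_human_labels(input_str: str, known_classes: list, allow_new=True, strict=False):
--     tokens = [x.strip() for x in (input_str or "").split(",") if x.strip()]
--     if not tokens:
--         return [], [], []
--     known_set = set(known_classes or [])
--     valid, new, invalid = [], [], []
--     for t in tokens:
--         if t in known_set:
--             valid.append(t)
--         else:
--             if allow_new and not strict:
--                 new.append(t)
--             else:
--                 invalid.append(t)
--     return valid, new, invalid
-- ===== SOURCE B (Python) =====
-- def _parse_human_labels(input_str: str, known_classes: list, allow_new=True, strict=False):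
--     # Character-level tokenizer: scan the string once, cutting tokens at commas
--     # (a sentinel comma flushes the last token); unknown tokens are collected in
--     # one list and routed to "new" or "invalid" by a single hoisted decision.
--     known = set(known_classes or [])
--     valid, unknown = [], []
--     buf = []
--     for ch in (input_str or "") + ",":
--         if ch == ",":
--             t = "".join(buf).strip()
--             buf = []
--             if t:
--                 (valid if t in known else unknown).append(t)
--         else:
--             buf.append(ch)
--     if allow_new and not strict:
--         return valid, unknown, []
--     return valid, [], unknown
-- ===== Notes on version B (the rewrite author's own statement) =====
-- stated objective: alternative
-- what changed: Replaces split+strip comprehension plus a per-token tri-way branching loop by a single character-level scan that cuts tokens at commas into two partitions, with the loop-invariant new-vs-invalid routing hoisted into one top-level decision.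
import Mathlib
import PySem

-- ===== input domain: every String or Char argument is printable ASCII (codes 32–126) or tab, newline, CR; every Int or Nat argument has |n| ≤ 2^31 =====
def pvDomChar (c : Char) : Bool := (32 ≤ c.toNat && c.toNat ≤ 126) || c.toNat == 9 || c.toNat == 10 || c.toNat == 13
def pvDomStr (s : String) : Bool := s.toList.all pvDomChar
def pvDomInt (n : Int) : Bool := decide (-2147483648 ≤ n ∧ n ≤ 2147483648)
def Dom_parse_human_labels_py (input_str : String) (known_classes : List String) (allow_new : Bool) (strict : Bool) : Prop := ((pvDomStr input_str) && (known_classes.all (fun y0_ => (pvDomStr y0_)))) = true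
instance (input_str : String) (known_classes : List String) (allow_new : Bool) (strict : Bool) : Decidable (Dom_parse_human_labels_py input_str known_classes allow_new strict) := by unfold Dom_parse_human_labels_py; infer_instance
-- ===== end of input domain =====

-- B replaces A's split/strip comprehension + per-token tri-way branching loop by a single
-- character-level scan cutting tokens at commas into two partitions plus one hoisted
-- top-level new-vs-invalid decision (objective: alternative). Return values proved equal.

-- ===== PORT A =====
-- the body of A's for-loop: append t to valid / new / invalid per A's branch order
-- (c is the loop-invariant value of 'allow_new and not strict')
def triStep (p : String → Bool) (c : Bool) (acc : List String × List String × List String) (t : String) : List String × List String × List String :=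
  if p t then (acc.1 ++ [t], acc.2.1, acc.2.2)
  else if c then (acc.1, acc.2.1 ++ [t], acc.2.2)
  else (acc.1, acc.2.1, acc.2.2 ++ [t])

-- tokens = [x.strip() for x in (input_str or "").split(",") if x.strip()]; sep "," ≠ "" so split? is always some
def parse_human_labels_py (input_str : String) (known_classes : List String) (allow_new : Bool) (strict : Bool) : List String × List String × List String :=
  let tokens := ((PySem.Str.split? (if input_str = "" then "" else input_str) ",").getD []).filterMap
      (fun x => if PySem.Str.strip x ≠ "" then some (PySem.Str.strip x) else none)
  if tokens = [] then ([], [], [])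
  else
    let known_set : PySem.Set String := PySem.Set.ofList (if known_classes = [] then [] else known_classes)
    tokens.foldl (triStep (fun t => PySem.Set.contains known_set t) (allow_new && !strict)) ([], [], [])

-- ===== PORT B =====
-- B's loop body: on ',' flush buf as a stripped token into valid/unknown (skip if empty),
-- otherwise append ch to buf; state = ((valid, unknown), buf)
def scanStep (p : String → Bool) (st : (List String × List String) × List Char) (ch : Char) : (List String × List String) × List Char :=
  if ch = ',' then
    let t := PySem.Str.strip (String.ofList st.2)
    if t ≠ "" then
      (if p t then ((st.1.1 ++ [t]), st.1.2) else (st.1.1, st.1.2 ++ [t]), [])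
    else (st.1, [])
  else (st.1, st.2 ++ [ch])

-- 'for ch in (input_str or "") + ","' iterates the characters of the string with a sentinel comma;
-- ported as a fold over the char list ++ [','] (exact: Python string concat/iteration = char list)
def parse_human_labels_py_alt (input_str : String) (known_classes : List String) (allow_new : Bool) (strict : Bool) : List String × List String × List String :=
  let known : PySem.Set String := PySem.Set.ofList (if known_classes = [] then [] else known_classes)
  let st := ((if input_str = "" then "" else input_str).toList ++ [',']).foldl
      (scanStep (fun t => PySem.Set.contains known t)) (([], []), [])
  if allow_new && !strict then (st.1.1, st.1.2, []) else (st.1.1, [], st.1.2)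

-- ===== PRECONDITION & SPEC =====
def Spec_parse_human_labels_py (input_str : String) (known_classes : List String) (allow_new : Bool) (strict : Bool) (out : List String × List String × List String) : Prop := out = parse_human_labels_py_alt input_str known_classes allow_new strict
instance (input_str : String) (known_classes : List String) (allow_new : Bool) (strict : Bool) (out : List String × List String × List String) : Decidable (Spec_parse_human_labels_py input_str known_classes allow_new strict out) := by unfold Spec_parse_human_labels_py; infer_instance

-- ===== CLAIM (what is proved, stated in full; the proofs are below) =====
def Claim_equal_parse_human_labels_py : Prop := ∀ (input_str : String) (known_classes : List String) (allow_new : Bool) (strict : Bool), Dom_parse_human_labels_py input_str known_classes allow_new strict → Spec_parse_human_labels_py input_str known_classes allow_new strict (parse_human_labels_py input_str known_classes allow_new strict)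

-- ===== LEMMAS AND PROOFS =====

-- the raw comma-separated pieces of l, with pre the chars read so far of the current piece
def scanTokens (pre : List Char) : List Char → List (List Char)
  | [] => [pre]
  | a :: l => if a = ',' then pre :: scanTokens [] l else scanTokens (pre ++ [a]) l

-- PySem's fuel-based split on the single-char separator ',' computes scanTokens
lemma go_single (l : List Char) : ∀ (fuel : Nat) (cur : List Char) (acc : List (List Char)),
    l.length < fuel →
    PySem.Chars.splitOn.go [','] fuel l cur acc = acc.reverse ++ scanTokens cur.reverse l := by
  induction l with
  | nil =>
    intro fuel cur acc h
    match fuel, h with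
    | fuel + 1, _ => simp [PySem.Chars.splitOn.go, scanTokens]
  | cons a l ih =>
    intro fuel cur acc h
    match fuel, h with
    | fuel + 1, h =>
      by_cases ha : a = ','
      · subst ha
        rw [show PySem.Chars.splitOn.go [','] (fuel+1) (','::l) cur acc
              = PySem.Chars.splitOn.go [','] fuel l [] (cur.reverse :: acc) from by
            simp [PySem.Chars.splitOn.go, List.isPrefixOf]]
        rw [ih fuel [] (cur.reverse :: acc) (by simpa using h)]
        simp [scanTokens]
      · rw [show PySem.Chars.splitOn.go [','] (fuel+1) (a::l) cur acc
              = PySem.Chars.splitOn.go [','] fuel l (a :: cur) acc from by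
            simp only [PySem.Chars.splitOn.go, List.isPrefixOf]
            simp
            intro h'
            exact absurd h'.symm ha]
        rw [ih fuel (a :: cur) acc (by simpa using h)]
        simp [scanTokens, ha]

lemma splitOn_single (l : List Char) : PySem.Chars.splitOn l [','] = scanTokens [] l := by
  simpa using go_single l (l.length + 1) [] [] (Nat.lt_succ_self _)

-- B's classification of one raw piece: strip it, skip if empty, else route by p
def classify (p : String → Bool) (vu : List String × List String) (cs : List Char) : List String × List String :=
  let t := PySem.Str.strip (String.ofList cs)
  if t ≠ "" then (if p t then (vu.1 ++ [t], vu.2) else (vu.1, vu.2 ++ [t])) else vu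

-- B's char scan over l with the sentinel comma = fold of classify over the raw pieces
lemma scan_eq (p : String → Bool) (l : List Char) : ∀ (buf : List Char) (v u : List String),
    (l ++ [',']).foldl (scanStep p) ((v, u), buf)
      = ((scanTokens buf l).foldl (classify p) (v, u), []) := by
  induction l with
  | nil =>
    intro buf v u
    simp only [List.nil_append, List.foldl_cons, List.foldl_nil, scanTokens, scanStep, classify]
    split_ifs <;> simp_all
  | cons a l ih =>
    intro buf v u
    by_cases ha : a = ','
    · subst ha
      rw [List.cons_append, List.foldl_cons,
          show scanStep p ((v, u), buf) ',' = ((classify p (v, u) buf), []) from by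
            simp only [scanStep, classify]; split_ifs <;> simp_all]
      rw [ih [] (classify p (v, u) buf).1 (classify p (v, u) buf).2]
      simp [scanTokens]
    · rw [List.cons_append, List.foldl_cons,
          show scanStep p ((v, u), buf) a = ((v, u), buf ++ [a]) from by simp [scanStep, ha]]
      rw [ih (buf ++ [a]) v u]
      simp [scanTokens, ha]

-- fold of classify = the two membership partitions of the stripped nonempty tokens
lemma classify_eq (p : String → Bool) (ts : List (List Char)) : ∀ (v u : List String),
    ts.foldl (classify p) (v, u)
      = (v ++ ((ts.map (fun cs => PySem.Str.strip (String.ofList cs))).filter (fun t => t ≠ "")).filter p,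
         u ++ ((ts.map (fun cs => PySem.Str.strip (String.ofList cs))).filter (fun t => t ≠ "")).filter (fun t => !(p t))) := by
  induction ts with
  | nil => intro v u; simp
  | cons cs ts ih =>
    intro v u
    rw [List.foldl_cons]
    by_cases h : PySem.Str.strip (String.ofList cs) = ""
    · rw [show classify p (v, u) cs = (v, u) from by simp [classify, h]]
      rw [ih]; simp [h]
    · by_cases hp : p (PySem.Str.strip (String.ofList cs)) = true
      · rw [show classify p (v, u) cs = (v ++ [PySem.Str.strip (String.ofList cs)], u) from by
            simp [classify, h, hp]]
        rw [ih]; simp [h, hp]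
      · rw [show classify p (v, u) cs = (v, u ++ [PySem.Str.strip (String.ofList cs)]) from by
            simp [classify, h, hp]]
        rw [ih]; simp [h, hp]

-- A's comprehension (filterMap) builds the stripped nonempty tokens as a map-then-filter
lemma tokens_eq (xs : List String) :
    xs.filterMap (fun x => if PySem.Str.strip x ≠ "" then some (PySem.Str.strip x) else none)
      = (xs.map (fun x => PySem.Str.strip x)).filter (fun t => t ≠ "") := by
  induction xs with
  | nil => rfl
  | cons x xs ih =>
    simp only [List.filterMap_cons, List.map_cons, List.filter_cons]
    by_cases h : PySem.Str.strip x = ""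
    · simpa [h] using ih
    · simpa [h] using ih

-- A's tri-way loop computes the two membership partitions steered by the hoisted constant c
lemma loop_eq (p : String → Bool) (c : Bool) (ts v n i : List String) :
    ts.foldl (triStep p c) (v, n, i)
      = (v ++ ts.filter p,
         (if c then n ++ ts.filter (fun t => !(p t)) else n),
         (if c then i else i ++ ts.filter (fun t => !(p t)))) := by
  induction ts generalizing v n i with
  | nil => simp
  | cons t ts ih =>
    rw [List.foldl_cons]
    by_cases hp : p t = true
    · rw [show triStep p c (v, n, i) t = (v ++ [t], n, i) from by simp [triStep, hp], ih]
      simp [hp]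
    · cases c
      · rw [show triStep p false (v, n, i) t = (v, n, i ++ [t]) from by simp [triStep, hp], ih]
        simp [hp]
      · rw [show triStep p true (v, n, i) t = (v, n ++ [t], i) from by simp [triStep, hp], ih]
        simp [hp]

-- ===== VERDICT (by name: the statement is the Claim_ definition above) =====
theorem parse_human_labels_py_spec : Claim_equal_parse_human_labels_py := by
  intro input_str known_classes allow_new strict _
  show parse_human_labels_py _ _ _ _ = parse_human_labels_py_alt _ _ _ _
  have hs : (if input_str = "" then "" else input_str) = input_str := by
    split_ifs with h
    · exact h.symm
    · rfl
  set p : String → Bool :=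
    (fun t => PySem.Set.contains (PySem.Set.ofList (if known_classes = [] then [] else known_classes)) t) with hp
  simp only [parse_human_labels_py, parse_human_labels_py_alt, hs]
  rw [show PySem.Str.split? input_str "," = some ((PySem.Chars.splitOn input_str.toList [',']).map String.ofList) from by
        simp [PySem.Str.split?, PySem.Chars.split?]]
  rw [scan_eq, classify_eq]
  simp only [Option.getD_some, tokens_eq, splitOn_single, List.map_map]
  set L := (((scanTokens [] input_str.toList).map
      (fun cs => PySem.Str.strip (String.ofList cs))).filter (fun t => t ≠ "")) with hL
  have hmap : ((scanTokens [] input_str.toList).map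
      (PySem.Str.strip ∘ String.ofList)).filter (fun t => t ≠ "") = L := by
    simp [hL, Function.comp_def]
  rw [hmap]
  by_cases h : L = []
  · rw [if_pos h, h]
    cases allow_new && !strict <;> simp
  · rw [if_neg h, loop_eq]
    cases allow_new && !strict <;> simp
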